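-- pv_equiv track=rewrite | github.com/Toralis-Labs/Aortic-Dynamics-Model | src/step3/naming_orientation.py | _find_edge_walk
-- ===== SOURCE A (Python) =====
-- from typing import Any, Dict, Iterable, Optional
--
-- def _find_edge_walk(
--     adjacency: dict[int, list[tuple[int, int]]],
--     current_node: int,
--     target_node: int,
--     remaining_edges: frozenset[int],
-- ) -> Optional[list[tuple[int, int, int]]]:
--     if not remaining_edges:
--         return [] if int(current_node) == int(target_node) else None
--     for neighbor, edge_id in adjacency.get(int(current_node), []):
--         if edge_id not in remaining_edges:
--             continue
--         sub = _find_edge_walk(adjacency, neighbor, target_node, remaining_edges - {edge_id})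
--         if sub is not None:
--             return [(int(current_node), int(neighbor), int(edge_id))] + sub
--     return None
-- ===== SOURCE B (Python) =====
-- def _find_edge_walk(
--     adjacency,
--     current_node,
--     target_node,
--     remaining_edges,
-- ):
--     # Iterative backtracking over an explicit stack of frames
--     # (node, remaining-edge frozenset, iterator over that node's adjacency);
--     # `path` holds the edges taken to reach the top frame.
--     start = int(current_node)
--     stack = [(start, frozenset(remaining_edges), iter(adjacency.get(start, [])))]
--     path = []
--     while stack:
--         node, rem, it = stack[-1]
--         if not rem:
--             if int(node) == int(target_node):
--                 return path
--             stack.pop()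
--             if path:
--                 path.pop()
--             continue
--         found = None
--         for neighbor, edge_id in it:
--             if edge_id in rem:
--                 found = (neighbor, edge_id)
--                 break
--         if found is None:
--             stack.pop()
--             if path:
--                 path.pop()
--             continue
--         neighbor, edge_id = found
--         child = int(neighbor)
--         stack.append((child, rem - {edge_id}, iter(adjacency.get(child, []))))
--         path.append((int(node), child, int(edge_id)))
--     return None
-- ===== Notes on version B (the rewrite author's own statement) =====
-- stated objective: alternative
-- what changed: The recursive DFS over remaining edges is rewritten as an iterative backtracking search with an explicit stack of frames (node, remaining-edge set, adjacency iterator) and a shared path accumulator that is popped on backtrack.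
import Mathlib
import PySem

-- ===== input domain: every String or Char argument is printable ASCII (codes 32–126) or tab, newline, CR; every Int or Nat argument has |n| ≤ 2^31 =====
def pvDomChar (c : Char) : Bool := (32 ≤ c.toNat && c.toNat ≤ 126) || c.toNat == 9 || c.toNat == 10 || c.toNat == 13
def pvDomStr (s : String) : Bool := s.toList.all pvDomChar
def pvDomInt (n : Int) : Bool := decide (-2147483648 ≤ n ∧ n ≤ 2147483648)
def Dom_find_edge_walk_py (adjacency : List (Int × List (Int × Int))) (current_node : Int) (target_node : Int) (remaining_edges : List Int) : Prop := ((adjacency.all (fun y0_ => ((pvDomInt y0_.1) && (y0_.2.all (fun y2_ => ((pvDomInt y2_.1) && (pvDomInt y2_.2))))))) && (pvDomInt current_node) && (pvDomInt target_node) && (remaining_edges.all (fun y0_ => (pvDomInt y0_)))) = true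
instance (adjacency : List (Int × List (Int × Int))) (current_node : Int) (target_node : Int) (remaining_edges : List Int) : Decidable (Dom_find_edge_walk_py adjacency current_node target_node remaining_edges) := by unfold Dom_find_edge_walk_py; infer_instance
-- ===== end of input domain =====

-- B replaces A's recursive DFS by an explicit iterative stack machine (alternative decomposition, same cost).

-- shared helper: `adjacency.get(k, [])` on the association list (first match)
def pvAdjGetD : List (Int × List (Int × Int)) → Int → List (Int × Int)
  | [], _ => []
  | (k, v) :: rest, n => if k == n then v else pvAdjGetD rest n

-- termination helper for port A (removing a contained edge shrinks the set)
theorem pvFilterLt (rem : List Int) (e : Int) (h : e ∈ rem) :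
    (rem.filter (fun x => !(x == e))).length < rem.length :=
  List.length_filter_lt_length_iff_exists.mpr ⟨e, h, by simp⟩

-- ===== PORT A =====
mutual
def find_edge_walk_py (adjacency : List (Int × List (Int × Int))) (current_node : Int) (target_node : Int) (remaining_edges : List Int) : Option (List (Int × Int × Int)) :=
  if remaining_edges.isEmpty then
    (if current_node == target_node then some [] else none)
  else
    pvGoA adjacency target_node current_node remaining_edges (pvAdjGetD adjacency current_node)
termination_by (remaining_edges.length, (pvAdjGetD adjacency current_node).length + 2)

-- the `for neighbor, edge_id in adjacency.get(...)` loop of A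
def pvGoA (adjacency : List (Int × List (Int × Int))) (target_node : Int) (current_node : Int) (remaining_edges : List Int) (nbrs : List (Int × Int)) : Option (List (Int × Int × Int)) :=
  match nbrs with
  | [] => none
  | (neighbor, edge_id) :: rest =>
    if h : remaining_edges.contains edge_id then
      match find_edge_walk_py adjacency neighbor target_node (remaining_edges.filter (fun e => !(e == edge_id))) with
      | some sub => some ((current_node, neighbor, edge_id) :: sub)
      | none => pvGoA adjacency target_node current_node remaining_edges rest
    else pvGoA adjacency target_node current_node remaining_edges rest
termination_by (remaining_edges.length, nbrs.length + 1)
decreasing_by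
  · exact Prod.Lex.left _ _ (pvFilterLt _ _ (by simpa using h))
  · exact Prod.Lex.right _ (by simp only [List.length_cons]; omega)
  · exact Prod.Lex.right _ (by simp only [List.length_cons]; omega)
end

-- ===== PORT B =====
-- the `for neighbor, edge_id in it` resumption loop of B: first entry whose edge is still available
def pvScanB (rem : List Int) : List (Int × Int) → Option (Int × Int × List (Int × Int))
  | [] => none
  | (nb, eid) :: rest => if rem.contains eid then some (nb, eid, rest) else pvScanB rem rest

-- B's while-loop: stack of frames (node, remaining set, iterator suffix), shared path; fuel only makes it total
def pvRunB (adjacency : List (Int × List (Int × Int))) (target_node : Int) : Nat → List (Int × List Int × List (Int × Int)) → List (Int × Int × Int) → Option (List (Int × Int × Int))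
  | 0, _, _ => none
  | _ + 1, [], _ => none
  | fuel + 1, (node, rem, it) :: stack, path =>
    if rem.isEmpty then
      if node == target_node then some path
      else pvRunB adjacency target_node fuel stack path.dropLast
    else
      match pvScanB rem it with
      | none => pvRunB adjacency target_node fuel stack path.dropLast
      | some (nb, eid, rest) =>
        pvRunB adjacency target_node fuel
          ((nb, rem.filter (fun e => !(e == eid)), pvAdjGetD adjacency nb) :: (node, rem, rest) :: stack)
          (path ++ [(node, nb, eid)])

-- a provably sufficient iteration budget (proved in pvC_succ_le below)
def pvFuelB (adjacency : List (Int × List (Int × Int))) (current_node : Int) (remaining_edges : List Int) : Nat :=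
  ((adjacency.map (fun p => p.2.length)).sum + 2) ^ remaining_edges.length * ((pvAdjGetD adjacency current_node).length + 2)

def find_edge_walk_py_alt (adjacency : List (Int × List (Int × Int))) (current_node : Int) (target_node : Int) (remaining_edges : List Int) : Option (List (Int × Int × Int)) :=
  pvRunB adjacency target_node (pvFuelB adjacency current_node remaining_edges)
    [(current_node, remaining_edges, pvAdjGetD adjacency current_node)] []

-- ===== PRECONDITION & SPEC =====
def Spec_find_edge_walk_py (adjacency : List (Int × List (Int × Int))) (current_node : Int) (target_node : Int) (remaining_edges : List Int) (out : Option (List (Int × Int × Int))) : Prop := out = find_edge_walk_py_alt adjacency current_node target_node remaining_edges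
instance (adjacency : List (Int × List (Int × Int))) (current_node : Int) (target_node : Int) (remaining_edges : List Int) (out : Option (List (Int × Int × Int))) : Decidable (Spec_find_edge_walk_py adjacency current_node target_node remaining_edges out) := by unfold Spec_find_edge_walk_py; infer_instance

-- ===== CLAIM (what is proved, stated in full; the proofs are below) =====
def Claim_equal_find_edge_walk_py : Prop := ∀ (adjacency : List (Int × List (Int × Int))) (current_node : Int) (target_node : Int) (remaining_edges : List Int), Dom_find_edge_walk_py adjacency current_node target_node remaining_edges → Spec_find_edge_walk_py adjacency current_node target_node remaining_edges (find_edge_walk_py adjacency current_node target_node remaining_edges)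

-- ===== LEMMAS AND PROOFS =====

theorem pvScanB_some {rem : List Int} : ∀ {it : List (Int × Int)} {nb eid : Int} {rest : List (Int × Int)},
    pvScanB rem it = some (nb, eid, rest) → eid ∈ rem ∧ rest.length < it.length := by
  intro it
  induction it with
  | nil => intro nb eid rest h; simp [pvScanB] at h
  | cons a t ih =>
    intro nb eid rest h
    obtain ⟨x, y⟩ := a
    by_cases hc : y ∈ rem
    · simp [pvScanB, hc] at h
      obtain ⟨h1, h2, h3⟩ := h
      subst h1; subst h2; subst h3
      exact ⟨hc, by simp⟩
    · simp [pvScanB, hc] at h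
      obtain ⟨h1, h2⟩ := ih h
      exact ⟨h1, by simp only [List.length_cons]; omega⟩

-- frame result: what A computes for a frame resumed at iterator suffix `it`
def pvSA (adjacency : List (Int × List (Int × Int))) (target_node node : Int) (rem : List Int) (it : List (Int × Int)) : Option (List (Int × Int × Int)) :=
  if rem.isEmpty then (if node == target_node then some [] else none)
  else pvGoA adjacency target_node node rem it

-- exact number of machine iterations frame (node, rem, it) consumes
def pvC (adjacency : List (Int × List (Int × Int))) (target_node : Int) (node : Int) (rem : List Int) (it : List (Int × Int)) : Nat :=
  if rem.isEmpty then 1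
  else match h : pvScanB rem it with
    | none => 1
    | some (nb, eid, rest) =>
      1 + pvC adjacency target_node nb (rem.filter (fun e => !(e == eid))) (pvAdjGetD adjacency nb)
        + (match find_edge_walk_py adjacency nb target_node (rem.filter (fun e => !(e == eid))) with
           | some _ => 0
           | none => pvC adjacency target_node node rem rest)
termination_by (rem.length, it.length)
decreasing_by
  · exact Prod.Lex.left _ _ (by
      rw [List.unattach_filter (g := fun x => !x == eid) (hf := fun x h => rfl),
        List.unattach_attach]
      exact pvFilterLt rem eid (pvScanB_some h).1)
  · exact Prod.Lex.right _ (pvScanB_some h).2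

theorem pvC_empty (adjacency : List (Int × List (Int × Int))) (target_node node : Int) (rem : List Int) (it : List (Int × Int)) (he : rem.isEmpty = true) :
    pvC adjacency target_node node rem it = 1 := by
  rw [pvC, if_pos he]

theorem pvC_none (adjacency : List (Int × List (Int × Int))) (target_node node : Int) (rem : List Int) (it : List (Int × Int)) (he : ¬rem.isEmpty = true) (hs : pvScanB rem it = none) :
    pvC adjacency target_node node rem it = 1 := by
  rw [pvC, if_neg he]
  split
  · rfl
  · next nb eid rest hx => rw [hs] at hx; cases hx

theorem pvC_some (adjacency : List (Int × List (Int × Int))) (target_node node : Int) (rem : List Int) (it : List (Int × Int)) (nb eid : Int) (rest : List (Int × Int)) (he : ¬rem.isEmpty = true) (hs : pvScanB rem it = some (nb, eid, rest)) :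
    pvC adjacency target_node node rem it
      = 1 + pvC adjacency target_node nb (rem.filter (fun e => !(e == eid))) (pvAdjGetD adjacency nb)
        + (match find_edge_walk_py adjacency nb target_node (rem.filter (fun e => !(e == eid))) with
           | some _ => 0
           | none => pvC adjacency target_node node rem rest) := by
  rw [pvC, if_neg he]
  split
  · next hx => rw [hs] at hx; cases hx
  · next nb' eid' rest' hx =>
    rw [hs] at hx
    simp only [Option.some.injEq, Prod.mk.injEq] at hx
    obtain ⟨h1, h2, h3⟩ := hx
    subst h1; subst h2; subst h3
    rfl

theorem pvC_pos (adjacency : List (Int × List (Int × Int))) (target_node node : Int) (rem : List Int) (it : List (Int × Int)) :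
    1 ≤ pvC adjacency target_node node rem it := by
  by_cases he : rem.isEmpty = true
  · rw [pvC_empty adjacency target_node node rem it he]
  · cases hs : pvScanB rem it with
    | none => rw [pvC_none adjacency target_node node rem it he hs]
    | some trip =>
      obtain ⟨nb, eid, rest⟩ := trip
      rw [pvC_some adjacency target_node node rem it nb eid rest he hs]
      omega

theorem pvGoA_scan_none {adjacency : List (Int × List (Int × Int))} {target_node node : Int} {rem : List Int} :
    ∀ {it : List (Int × Int)}, pvScanB rem it = none → pvGoA adjacency target_node node rem it = none := by
  intro it
  induction it with
  | nil => intro _; rw [pvGoA]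
  | cons a t ih =>
    intro h
    obtain ⟨x, y⟩ := a
    by_cases hc : y ∈ rem
    · simp [pvScanB, hc] at h
    · simp [pvScanB, hc] at h
      rw [pvGoA]
      simp [hc]
      exact ih h

theorem pvGoA_scan_some {adjacency : List (Int × List (Int × Int))} {target_node node : Int} {rem : List Int} :
    ∀ {it : List (Int × Int)} {nb eid : Int} {rest : List (Int × Int)}, pvScanB rem it = some (nb, eid, rest) →
    pvGoA adjacency target_node node rem it =
      (match find_edge_walk_py adjacency nb target_node (rem.filter (fun e => !(e == eid))) with
       | some sub => some ((node, nb, eid) :: sub)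
       | none => pvGoA adjacency target_node node rem rest) := by
  intro it
  induction it with
  | nil => intro nb eid rest h; simp [pvScanB] at h
  | cons a t ih =>
    intro nb eid rest h
    obtain ⟨x, y⟩ := a
    by_cases hc : y ∈ rem
    · simp [pvScanB, hc] at h
      obtain ⟨h1, h2, h3⟩ := h
      subst h1; subst h2; subst h3
      rw [pvGoA]
      simp [hc]
    · simp [pvScanB, hc] at h
      rw [pvGoA]
      simp [hc]
      exact ih h

theorem pvRunB_nil (adjacency : List (Int × List (Int × Int))) (target_node : Int) (f : Nat) (p : List (Int × Int × Int)) :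
    pvRunB adjacency target_node f [] p = none := by
  cases f <;> rw [pvRunB]

-- main invariant: with exactly pvC extra fuel, the machine computes the frame's A-result,
-- or pops to the rest of the stack with the path entry removed
theorem pvMain (adjacency : List (Int × List (Int × Int))) (target_node : Int) :
    ∀ (K M : Nat) (node : Int) (rem : List Int) (it : List (Int × Int)),
      rem.length < K → it.length < M →
      ∀ (f : Nat) (stack : List (Int × List Int × List (Int × Int))) (path : List (Int × Int × Int)),
      pvRunB adjacency target_node (f + pvC adjacency target_node node rem it) ((node, rem, it) :: stack) path
        = match pvSA adjacency target_node node rem it with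
          | some sub => some (path ++ sub)
          | none => pvRunB adjacency target_node f stack path.dropLast := by
  intro K
  induction K with
  | zero => intro M node rem it hK; omega
  | succ K ihK =>
    intro M
    induction M with
    | zero => intro node rem it hK hM; omega
    | succ M ihM =>
      intro node rem it hK hM f stack path
      have hC := pvC_pos adjacency target_node node rem it
      obtain ⟨g, hg⟩ : ∃ g, f + pvC adjacency target_node node rem it = g + 1 := ⟨f + pvC adjacency target_node node rem it - 1, by omega⟩
      rw [hg, pvRunB]
      by_cases he : rem.isEmpty
      · have hc1 : pvC adjacency target_node node rem it = 1 := pvC_empty adjacency target_node node rem it he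
        have hgf : g = f := by omega
        subst hgf
        simp only [he, if_true]
        rw [pvSA]
        simp only [he, if_true]
        by_cases ht : node == target_node
        · simp [ht]
        · simp [ht]
      · simp only [he]
        rw [pvSA]
        simp only [he, if_false, Bool.false_eq_true]
        cases hscan : pvScanB rem it with
        | none =>
          have hc1 : pvC adjacency target_node node rem it = 1 := pvC_none adjacency target_node node rem it he hscan
          have hgf : g = f := by omega
          subst hgf
          rw [pvGoA_scan_none hscan]
        | some trip =>
          obtain ⟨nb, eid, rest⟩ := trip
          obtain ⟨hmem, hlen⟩ := pvScanB_some hscan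
          have hrem' : (rem.filter (fun e => !(e == eid))).length < rem.length := pvFilterLt _ _ hmem
          rw [pvGoA_scan_some hscan]
          simp only
          cases hsub : find_edge_walk_py adjacency nb target_node (rem.filter (fun e => !(e == eid))) with
          | some sub =>
            have hc : pvC adjacency target_node node rem it
                = 1 + pvC adjacency target_node nb (rem.filter (fun e => !(e == eid))) (pvAdjGetD adjacency nb) := by
              rw [pvC_some adjacency target_node node rem it nb eid rest he hscan]
              simp [hsub]
            have hgeq : g = f + pvC adjacency target_node nb (rem.filter (fun e => !(e == eid))) (pvAdjGetD adjacency nb) := by omega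
            rw [hgeq]
            rw [ihK (M := (pvAdjGetD adjacency nb).length + 1) nb _ _ (by omega) (by omega)]
            have hSA : pvSA adjacency target_node nb (rem.filter (fun e => !(e == eid))) (pvAdjGetD adjacency nb)
                = find_edge_walk_py adjacency nb target_node (rem.filter (fun e => !(e == eid))) := by
              rw [pvSA, find_edge_walk_py]
            rw [hSA, hsub]
            simp
          | none =>
            have hc : pvC adjacency target_node node rem it
                = 1 + pvC adjacency target_node nb (rem.filter (fun e => !(e == eid))) (pvAdjGetD adjacency nb)
                  + pvC adjacency target_node node rem rest := by
              rw [pvC_some adjacency target_node node rem it nb eid rest he hscan]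
              simp only [hsub]
            have hgeq : g = (f + pvC adjacency target_node node rem rest)
                + pvC adjacency target_node nb (rem.filter (fun e => !(e == eid))) (pvAdjGetD adjacency nb) := by omega
            rw [hgeq]
            rw [ihK (M := (pvAdjGetD adjacency nb).length + 1) nb _ _ (by omega) (by omega)]
            have hSA : pvSA adjacency target_node nb (rem.filter (fun e => !(e == eid))) (pvAdjGetD adjacency nb)
                = find_edge_walk_py adjacency nb target_node (rem.filter (fun e => !(e == eid))) := by
              rw [pvSA, find_edge_walk_py]
            rw [hSA, hsub]
            simp only
            have hdrop : (path ++ [(node, nb, eid)]).dropLast = path := by simp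
            rw [hdrop]
            have := ihM node rem rest (by omega) (by omega) (f := f) (stack := stack) (path := path)
            rw [this]
            rw [pvSA, if_neg he]

theorem pvAdjGetD_le (adjacency : List (Int × List (Int × Int))) (n : Int) :
    (pvAdjGetD adjacency n).length ≤ (adjacency.map (fun p => p.2.length)).sum := by
  induction adjacency with
  | nil => simp [pvAdjGetD]
  | cons a t ih =>
    obtain ⟨k, v⟩ := a
    by_cases hk : k == n
    · simp [pvAdjGetD, hk]
    · simp [pvAdjGetD, hk]
      omega

theorem pvC_succ_le (adjacency : List (Int × List (Int × Int))) (target_node : Int) :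
    ∀ (K M : Nat) (node : Int) (rem : List Int) (it : List (Int × Int)),
      rem.length < K → it.length < M →
      pvC adjacency target_node node rem it + 1
        ≤ ((adjacency.map (fun p => p.2.length)).sum + 2) ^ rem.length * (it.length + 2) := by
  intro K
  induction K with
  | zero => intro M node rem it hK; omega
  | succ K ihK =>
    intro M
    induction M with
    | zero => intro node rem it hK hM; omega
    | succ M ihM =>
      intro node rem it hK hM
      set T : Nat := (adjacency.map (fun p => p.2.length)).sum with hT
      have hpow : 1 ≤ (T + 2) ^ rem.length := Nat.one_le_pow _ _ (by omega)
      by_cases he : rem.isEmpty = true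
      · rw [pvC_empty adjacency target_node node rem it he]
        calc 1 + 1 ≤ (T + 2) ^ rem.length * 2 := by omega
          _ ≤ (T + 2) ^ rem.length * (it.length + 2) := Nat.mul_le_mul_left _ (by omega)
      · cases hscan : pvScanB rem it with
        | none =>
          rw [pvC_none adjacency target_node node rem it he hscan]
          calc 1 + 1 ≤ (T + 2) ^ rem.length * 2 := by omega
            _ ≤ (T + 2) ^ rem.length * (it.length + 2) := Nat.mul_le_mul_left _ (by omega)
        | some trip =>
          obtain ⟨nb, eid, rest⟩ := trip
          obtain ⟨hmem, hlen⟩ := pvScanB_some hscan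
          have hrem' : (rem.filter (fun e => !(e == eid))).length < rem.length := pvFilterLt _ _ hmem
          have hc1 : pvC adjacency target_node nb (rem.filter (fun e => !(e == eid))) (pvAdjGetD adjacency nb) + 1
              ≤ (T + 2) ^ rem.length := by
            have h1 := ihK (M := (pvAdjGetD adjacency nb).length + 1) nb (rem.filter (fun e => !(e == eid))) (pvAdjGetD adjacency nb) (by omega) (by omega)
            have h2 : (pvAdjGetD adjacency nb).length + 2 ≤ T + 2 := by
              have := pvAdjGetD_le adjacency nb; omega
            have h3 : (T + 2) ^ (rem.filter (fun e => !(e == eid))).length * ((pvAdjGetD adjacency nb).length + 2)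
                ≤ (T + 2) ^ (rem.filter (fun e => !(e == eid))).length * (T + 2) :=
              Nat.mul_le_mul_left _ h2
            have h4 : (T + 2) ^ (rem.filter (fun e => !(e == eid))).length * (T + 2)
                = (T + 2) ^ ((rem.filter (fun e => !(e == eid))).length + 1) := by
              rw [pow_succ]
            have h5 : (T + 2) ^ ((rem.filter (fun e => !(e == eid))).length + 1) ≤ (T + 2) ^ rem.length :=
              Nat.pow_le_pow_right (by omega) (by omega)
            omega
          have hc2 : pvC adjacency target_node node rem rest + 1
              ≤ (T + 2) ^ rem.length * (rest.length + 2) := ihM node rem rest (by omega) (by omega)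
          have hrest : (T + 2) ^ rem.length * (rest.length + 2) + (T + 2) ^ rem.length
              ≤ (T + 2) ^ rem.length * (it.length + 2) := by
            have : (T + 2) ^ rem.length * (rest.length + 2) + (T + 2) ^ rem.length
                = (T + 2) ^ rem.length * (rest.length + 3) := by ring
            rw [this]
            exact Nat.mul_le_mul_left _ (by omega)
          cases hsub : find_edge_walk_py adjacency nb target_node (rem.filter (fun e => !(e == eid))) with
          | some sub =>
            rw [pvC_some adjacency target_node node rem it nb eid rest he hscan]
            simp only [hsub]
            have : (T + 2) ^ rem.length * 2 ≤ (T + 2) ^ rem.length * (it.length + 2) :=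
              Nat.mul_le_mul_left _ (by omega)
            omega
          | none =>
            rw [pvC_some adjacency target_node node rem it nb eid rest he hscan]
            simp only [hsub]
            omega

-- ===== VERDICT (by name: the statement is the Claim_ definition above) =====
theorem find_edge_walk_py_spec : Claim_equal_find_edge_walk_py := by
  intro adjacency current_node target_node remaining_edges _dom
  unfold Spec_find_edge_walk_py find_edge_walk_py_alt
  have hle := pvC_succ_le adjacency target_node (remaining_edges.length + 1) ((pvAdjGetD adjacency current_node).length + 1)
    current_node remaining_edges (pvAdjGetD adjacency current_node) (by omega) (by omega)
  obtain ⟨f, hf⟩ : ∃ f, pvFuelB adjacency current_node remaining_edges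
      = f + pvC adjacency target_node current_node remaining_edges (pvAdjGetD adjacency current_node) := by
    refine ⟨pvFuelB adjacency current_node remaining_edges
      - pvC adjacency target_node current_node remaining_edges (pvAdjGetD adjacency current_node), ?_⟩
    unfold pvFuelB
    omega
  rw [hf]
  rw [pvMain adjacency target_node (remaining_edges.length + 1) ((pvAdjGetD adjacency current_node).length + 1)
    current_node remaining_edges (pvAdjGetD adjacency current_node) (by omega) (by omega)]
  have hSA : pvSA adjacency target_node current_node remaining_edges (pvAdjGetD adjacency current_node)
      = find_edge_walk_py adjacency current_node target_node remaining_edges := by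
    rw [pvSA, find_edge_walk_py]
  rw [hSA]
  cases find_edge_walk_py adjacency current_node target_node remaining_edges with
  | none => simp [pvRunB_nil]
  | some sub => simp
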